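-- pv_equiv track=rewrite | github.com/lbartell/bunnies | staircase/solution.py | partition_q
-- ===== SOURCE A (Python) =====
-- from math import sqrt
--
-- def partition_q(n, j_sequence):
--     """Number of ways of writing an integer as a sum of distinct positive integers, disregarding order
--
--     Algorithm implementation based on:
--     https://mathworld.wolfram.com/PartitionFunctionQ.html
--
--     Args:
--         n: integer number to partition
--
--     Returns:
--         number of ways of writing an integer
--         as a sum of distinct positive integers, disregarding order
--     """
--     # Break out if zero
--     if n == 0:
--         return 1
--
--     sqrt_n = int(sqrt(n)) + 1
--     q_sum = sum(
--         ((-1) ** (k + 1)) * partition_q(n - k ** 2, j_sequence)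
--         for k in range(1, sqrt_n)
--     )
--
--     return s(n, j_sequence) + 2 * q_sum
--
-- def s(n, j_sequence):
--     if n in j_sequence:
--         return (-1) ** j_sequence[n]
--
--     else:
--         return 0
-- ===== SOURCE B (Python) =====
-- def partition_q(n, j_sequence):
--     """Bottom-up DP: q[m] for m = 0..n via the same Wolfram recurrence."""
--     q = [1]
--     for m in range(1, n + 1):
--         total = 0
--         k = 1
--         while k * k <= m:
--             total += q[m - k * k] if k % 2 else -q[m - k * k]
--             k += 1
--         base = (-1) ** j_sequence[m] if m in j_sequence else 0
--         q.append(base + 2 * total)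
--     return q[n]
-- ===== Notes on version B (the rewrite author's own statement) =====
-- stated objective: alternative
-- what changed: Replaced the tree recursion by a bottom-up dynamic-programming table q[0..n] filled once with the same Wolfram recurrence (each value computed once instead of recomputed recursively).
-- outside the precondition, e.g. on partition_q(1, {1: -1}): A returns 1.0, B returns 1.0
import Mathlib
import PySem

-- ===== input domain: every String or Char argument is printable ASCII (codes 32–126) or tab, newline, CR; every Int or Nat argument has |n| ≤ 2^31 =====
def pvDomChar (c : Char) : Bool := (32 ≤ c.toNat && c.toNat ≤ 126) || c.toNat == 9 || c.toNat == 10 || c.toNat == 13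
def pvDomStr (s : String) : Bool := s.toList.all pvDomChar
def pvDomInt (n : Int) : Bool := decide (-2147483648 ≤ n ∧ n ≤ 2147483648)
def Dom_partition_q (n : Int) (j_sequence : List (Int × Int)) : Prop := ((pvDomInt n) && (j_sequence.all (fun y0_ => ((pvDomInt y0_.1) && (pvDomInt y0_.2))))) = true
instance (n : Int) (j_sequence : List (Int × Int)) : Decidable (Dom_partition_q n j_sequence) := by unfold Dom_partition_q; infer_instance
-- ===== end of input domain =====

-- B builds a bottom-up DP table q[0..n] once (same Wolfram recurrence) instead of A's tree recursion.

-- ===== PORT A =====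
-- s(n, j_sequence): dict membership + (-1)**j_sequence[n]. The exponent is ported via .toNat:
-- exact for the nonnegative exponents Pre_ admits (Python returns a float for a negative exponent).
def pqS (n : Int) (j_sequence : List (Int × Int)) : Int :=
  let d := PySem.Dict.ofList j_sequence
  if d.contains n then (-1 : Int) ^ (d.getD n 0).toNat else 0

-- int(sqrt(n)) + 1 ported as Nat.sqrt n.toNat + 1: exact for 0 ≤ n ≤ 2^31 (Dom + Pre_);
-- for n < 0 Python's sqrt raises ValueError (excluded by Pre_). range(1, sqrt_n) over naturals.
def partition_q (n : Int) (j_sequence : List (Int × Int)) : Int :=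
  if n = 0 then 1
  else
    let sqrt_n := Nat.sqrt n.toNat + 1
    let q_sum := ((List.range' 1 (sqrt_n - 1)).attach.map
        (fun k => (-1 : Int) ^ (k.1 + 1) * partition_q (n - (k.1 : Int) ^ 2) j_sequence)).sum
    pqS n j_sequence + 2 * q_sum
termination_by n.toNat
decreasing_by
  have hk := k.2
  rw [List.mem_range'_1] at hk
  have hks : k.1 * k.1 ≤ n.toNat := Nat.le_sqrt.mp (by omega)
  have h1 : 1 ≤ k.1 * k.1 := by nlinarith [hk.1]
  have hcast : ((k.1 : Int)) ^ 2 = ((k.1 * k.1 : Nat) : Int) := by push_cast; ring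
  rw [hcast]; omega

-- ===== PORT B =====
-- the 'while k * k <= m' loop of Source B; q index m - k*k is always in range (getD default never read)
def pqInner (q : List Int) (m : Nat) (k : Nat) (total : Int) : Int :=
  if k * k ≤ m then
    pqInner q m (k + 1)
      (total + (if k % 2 = 1 then q.getD (m - k * k) 0 else -(q.getD (m - k * k) 0)))
  else total
termination_by m + 1 - k
decreasing_by
  have h1 : k ≤ k * k := by nlinarith
  omega

-- the body of Source B's 'for m in range(1, n+1)': append base + 2*total
def pqStep (d : PySem.Dict Int Int) (q : List Int) (m : Nat) : List Int :=
  q ++ [(if d.contains (m : Int) then (-1 : Int) ^ (d.getD (m : Int) 0).toNat else 0)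
        + 2 * pqInner q m 1 0]

def partition_q_alt (n : Int) (j_sequence : List (Int × Int)) : Int :=
  ((List.range' 1 n.toNat).foldl (pqStep (PySem.Dict.ofList j_sequence)) [1]).getD n.toNat 0
  -- q[n]: index in range for the 0 ≤ n that Pre_ admits

-- ===== PRECONDITION & SPEC =====
-- Pre_ excludes n < 0 (math.sqrt raises ValueError) and dicts mapping some looked-up key
-- 1..n to a negative value (there Python's (-1)**negative is a float, not an int).
def Pre_partition_q (n : Int) (j_sequence : List (Int × Int)) : Prop :=
  0 ≤ n ∧ ∀ p ∈ (PySem.Dict.ofList j_sequence).items, 1 ≤ p.1 → p.1 ≤ n → 0 ≤ p.2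
instance (n : Int) (j_sequence : List (Int × Int)) : Decidable (Pre_partition_q n j_sequence) := by
  unfold Pre_partition_q; infer_instance

def pvWitness_partition_q : Int × (List (Int × Int)) := (3, [(2, 1)])

def Spec_partition_q (n : Int) (j_sequence : List (Int × Int)) (out : Int) : Prop := out = partition_q_alt n j_sequence
instance (n : Int) (j_sequence : List (Int × Int)) (out : Int) : Decidable (Spec_partition_q n j_sequence out) := by unfold Spec_partition_q; infer_instance

-- ===== CLAIM (what is proved, stated in full; the proofs are below) =====
def Claim_equal_partition_q : Prop := ∀ (n : Int) (j_sequence : List (Int × Int)), Dom_partition_q n j_sequence → Pre_partition_q n j_sequence → Spec_partition_q n j_sequence (partition_q n j_sequence)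

-- ===== LEMMAS AND PROOFS =====

lemma sign_eq (k : Nat) (v : Int) : (if k % 2 = 1 then v else -v) = (-1 : Int) ^ (k + 1) * v := by
  rcases Nat.even_or_odd k with h | h
  · have hp : ((-1 : Int)) ^ k = 1 := h.neg_one_pow
    simp [Nat.even_iff.mp h, pow_succ, hp]
  · have hp : ((-1 : Int)) ^ k = -1 := h.neg_one_pow
    simp [Nat.odd_iff.mp h, pow_succ, hp]

-- the inner while-loop sums the signed table entries for k..sqrt m
lemma pqInner_spec (q : List Int) (m : Nat) (g : Nat → Int)
    (hq : ∀ i, i < m → q.getD i 0 = g i) :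
    ∀ k total, 1 ≤ k →
      pqInner q m k total =
        total + ((List.range' k (Nat.sqrt m + 1 - k)).map
          (fun i => (-1 : Int) ^ (i + 1) * g (m - i * i))).sum := by
  have main : ∀ d k total, 1 ≤ k → Nat.sqrt m + 1 - k = d →
      pqInner q m k total =
        total + ((List.range' k (Nat.sqrt m + 1 - k)).map
          (fun i => (-1 : Int) ^ (i + 1) * g (m - i * i))).sum := by
    intro d
    induction d with
    | zero =>
      intro k total hk hd
      have hkm : ¬ (k * k ≤ m) := fun h => by
        have := Nat.le_sqrt.mpr h; omega
      rw [pqInner, if_neg hkm, hd]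
      simp
    | succ d ih =>
      intro k total hk hd
      have hks : k ≤ Nat.sqrt m := by omega
      have hkm : k * k ≤ m := Nat.le_sqrt.mp hks
      have hlt : m - k * k < m := by
        have h1 : 1 ≤ k * k := by nlinarith
        omega
      rw [pqInner, if_pos hkm, ih (k + 1) _ (by omega) (by omega)]
      rw [hd, show d + 1 = (Nat.sqrt m + 1 - (k + 1)) + 1 by omega]
      rw [List.range'_succ, List.map_cons, List.sum_cons]
      rw [hq (m - k * k) hlt, sign_eq]
      ring
  intro k total hk
  exact main (Nat.sqrt m + 1 - k) k total hk rfl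

-- one unfolding of A's recursion, in Nat form
lemma partition_q_unfold (m : Nat) (j : List (Int × Int)) (hm : 1 ≤ m) :
    partition_q (m : Int) j =
      pqS (m : Int) j + 2 * ((List.range' 1 (Nat.sqrt m)).map
        (fun i => (-1 : Int) ^ (i + 1) * partition_q ((m - i * i : Nat) : Int) j)).sum := by
  have hm0 : ¬ ((m : Int) = 0) := by exact_mod_cast Nat.one_le_iff_ne_zero.mp hm
  rw [partition_q, if_neg hm0]
  simp only [Int.toNat_natCast, Nat.add_sub_cancel, List.map_subtype, List.unattach_attach]
  congr 2
  refine congrArg List.sum (List.map_congr_left ?_)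
  intro i hi
  rw [List.mem_range'_1] at hi
  have hii : i * i ≤ m := Nat.le_sqrt.mp (by omega)
  have : (m : Int) - (i : Int) ^ 2 = ((m - i * i : Nat) : Int) := by push_cast [hii]; ring
  rw [this]

-- B's table invariant: after L steps the table holds A's values for 0..L
lemma build_spec (j : List (Int × Int)) (L : Nat) :
    ((List.range' 1 L).foldl (pqStep (PySem.Dict.ofList j)) [1]).length = L + 1 ∧
    ∀ i, i ≤ L →
      ((List.range' 1 L).foldl (pqStep (PySem.Dict.ofList j)) [1]).getD i 0 =
        partition_q (i : Int) j := by
  induction L with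
  | zero =>
    refine ⟨rfl, ?_⟩
    intro i hi
    interval_cases i
    rw [partition_q]
    simp
  | succ L ih =>
    obtain ⟨hlen, hval⟩ := ih
    rw [List.range'_1_concat, List.foldl_append, List.foldl_cons, List.foldl_nil]
    set q := (List.range' 1 L).foldl (pqStep (PySem.Dict.ofList j)) [1] with hqdef
    constructor
    · simp [pqStep, hlen]
    · intro i hi
      rcases Nat.lt_or_ge i (L + 1) with hiL | hiL
      · rw [pqStep, List.getD_append q _ 0 i (by omega), hval i (by omega)]
      · have hieq : i = L + 1 := by omega
        subst hieq
        have hlast : (pqStep (PySem.Dict.ofList j) q (1 + L)).getD (L + 1) 0 =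
            (if (PySem.Dict.ofList j).contains ((1 + L : Nat) : Int) then
              (-1 : Int) ^ (((PySem.Dict.ofList j).getD ((1 + L : Nat) : Int) 0)).toNat else 0)
            + 2 * pqInner q (1 + L) 1 0 := by
          rw [pqStep]
          simp only [List.getD_eq_getElem?_getD]
          rw [List.getElem?_append_right (by omega)]
          simp [hlen]
        rw [hlast]
        have hinner := pqInner_spec q (1 + L) (fun i => partition_q (i : Int) j)
          (fun i hilt => hval i (by omega)) 1 0 (le_refl 1)
        rw [hinner, partition_q_unfold (L + 1) j (by omega)]
        rw [show 1 + L = L + 1 by omega]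
        simp only [Nat.add_sub_cancel, zero_add]
        rw [pqS]

-- ===== VERDICT (by name: the statement is the Claim_ definition above) =====
theorem partition_q_spec : Claim_equal_partition_q := by
  intro n j _hdom hpre
  unfold Spec_partition_q partition_q_alt
  obtain ⟨hn, -⟩ := hpre
  have h := (build_spec j n.toNat).2 n.toNat (le_refl _)
  rw [h, Int.toNat_of_nonneg hn]
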